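-- pv_equiv track=rewrite | github.com/Bhutanisachin19/Python-Practice-Codes | perfect_power.py | powerNumbers
-- ===== SOURCE A (Python) =====
-- def powerNumbers(n):
--
-- 	# v is going to store all
-- 	# unique power numbers
-- 	v = set();
-- 	v.add(1);
--
-- 	# Traverse through all base
-- 	# numbers and compute all
-- 	# their powers smaller than
-- 	# or equal to n.
-- 	for i in range(2, n+1):
-- 		if(i * i <= n):
-- 			j = i * i;
-- 			v.add(j);
-- 			while (j * i <= n):
-- 				v.add(j * i);
-- 				j = j * i;
--
-- 	return len(v);
-- ===== SOURCE B (Python) =====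
-- def powerNumbers(n):
--     # Pure counting, no set: every perfect power greater than one has a
--     # unique representation whose base is not itself a perfect power, so
--     # summing the exponent counts over non-power bases counts each perfect
--     # power exactly once; the number one is counted separately.
--     def is_power(m):
--         a = 2
--         while a * a <= m:
--             p = a * a
--             while p < m:
--                 p *= a
--             if p == m:
--                 return True
--             a += 1
--         return False
--
--     total = 1
--     b = 2
--     while b * b <= n:
--         if not is_power(b):
--             p = b * b
--             while p <= n:
--                 total += 1
--                 p *= b
--         b += 1
--     return total
-- ===== Notes on version B (the rewrite author's own statement) =====
-- stated objective: faster
-- what changed: B keeps no set at all: it counts arithmetically, iterating only over bases up to the square root of n that are themselves not perfect powers (checked by a helper) and adding for each the number of its powers not exceeding n, correct because every perfect power has a unique representation whose base is not itself a perfect power; A materialises every power of every base in a set and returns its size.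
import Mathlib
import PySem

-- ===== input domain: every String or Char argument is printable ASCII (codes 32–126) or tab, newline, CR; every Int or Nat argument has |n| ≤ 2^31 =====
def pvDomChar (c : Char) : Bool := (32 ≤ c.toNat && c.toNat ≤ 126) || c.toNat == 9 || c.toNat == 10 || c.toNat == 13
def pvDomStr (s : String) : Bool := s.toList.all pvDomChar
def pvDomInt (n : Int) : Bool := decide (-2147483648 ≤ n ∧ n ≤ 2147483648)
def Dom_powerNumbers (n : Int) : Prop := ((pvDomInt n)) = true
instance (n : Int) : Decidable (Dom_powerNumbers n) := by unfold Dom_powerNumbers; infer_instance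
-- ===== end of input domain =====

-- B replaces A's set of all powers by pure counting over non-power bases (one count per
-- canonical representation b^k, b not itself a perfect power): asymptotically faster, same result.

-- ===== PORT A =====
-- inner 'while (j * i <= n): v.add(j * i); j = j * i' of A.
-- The '2 ≤ i ∧ 0 < j' part of the guard only makes the recursion total; it holds on every call A makes.
def pvWhileA (n i j : Int) (v : PySem.Set Int) : PySem.Set Int :=
  if h : 2 ≤ i ∧ 0 < j ∧ j * i ≤ n then
    pvWhileA n i (j * i) (v.add (j * i))
  else v
termination_by (n + 1 - j).toNat
decreasing_by
  have h2 : j * 2 ≤ j * i := by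
    exact mul_le_mul_of_nonneg_left h.1 (le_of_lt h.2.1)
  omega

def powerNumbers (n : Int) : Int :=
  let v : PySem.Set Int := (PySem.Set.empty).add 1
  let v := (PySem.List.pyRange 2 (n + 1) 1).foldl
    (fun v i => if i * i ≤ n then pvWhileA n i (i * i) (v.add (i * i)) else v) v
  PySem.Set.len v

-- ===== PORT B =====
-- 'while p < m: p *= a' then 'p == m' of B's is_power (totality guard '2 ≤ a ∧ 0 < p' as above).
def pvIsPowInner (m a p : Int) : Bool :=
  if h : 2 ≤ a ∧ 0 < p ∧ p < m then pvIsPowInner m a (p * a) else p == m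
termination_by (m - p).toNat
decreasing_by
  have h2 : p * 2 ≤ p * a := mul_le_mul_of_nonneg_left h.1 (le_of_lt h.2.1)
  omega

-- B's is_power(m): scan bases a with a*a <= m ('2 ≤ a' is the totality guard).
def pvIsPow (m a : Int) : Bool :=
  if h : 2 ≤ a ∧ a * a ≤ m then
    if pvIsPowInner m a (a * a) then true else pvIsPow m (a + 1)
  else false
termination_by (m + 1 - a).toNat
decreasing_by
  have h2 : a * 1 ≤ a * a := mul_le_mul_of_nonneg_left (by omega) (by omega)
  omega

-- 'while p <= n: total += 1; p *= b' of B.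
def pvCountB (n b p t : Int) : Int :=
  if h : 2 ≤ b ∧ 0 < p ∧ p ≤ n then pvCountB n b (p * b) (t + 1) else t
termination_by (n + 1 - p).toNat
decreasing_by
  have h2 : p * 2 ≤ p * b := mul_le_mul_of_nonneg_left h.1 (le_of_lt h.2.1)
  omega

-- outer 'while b * b <= n: if not is_power(b): …; b += 1' of B.
def pvOuterB (n b t : Int) : Int :=
  if h : 2 ≤ b ∧ b * b ≤ n then
    pvOuterB n (b + 1) (if pvIsPow b 2 then t else pvCountB n b (b * b) t)
  else t
termination_by (n + 1 - b).toNat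
decreasing_by
  have h2 : b * 1 ≤ b * b := mul_le_mul_of_nonneg_left (by omega) (by omega)
  omega

def powerNumbers_alt (n : Int) : Int := pvOuterB n 2 1

-- ===== PRECONDITION & SPEC =====
def Spec_powerNumbers (n : Int) (out : Int) : Prop := out = powerNumbers_alt n
instance (n : Int) (out : Int) : Decidable (Spec_powerNumbers n out) := by unfold Spec_powerNumbers; infer_instance

-- ===== CLAIM (what is proved, stated in full; the proofs are below) =====
def Claim_equal_powerNumbers : Prop := ∀ (n : Int), Dom_powerNumbers n → Spec_powerNumbers n (powerNumbers n)

-- ===== LEMMAS AND PROOFS =====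

-- "m is a perfect power" (mathematical, over ℤ with ℕ exponent)
def pvIsPP (m : Int) : Prop := ∃ b : Int, ∃ k : ℕ, 2 ≤ b ∧ 2 ≤ k ∧ b ^ k = m

-- bounded, hence decidable, version used inside Finset.filter (abbrev: instance resolution sees through it)
abbrev pvIsPPb (m : Int) : Prop := ∃ b ∈ PySem.List.pyRange 2 (m + 1) 1, ∃ k ∈ List.range (m.toNat + 1), 2 ≤ k ∧ b ^ k = m

-- the distinct perfect powers 2 ≤ m ≤ n
noncomputable def pvPP (n : Int) : Finset ℤ := (Finset.Icc 2 n).filter pvIsPPb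

theorem pvIsPPb_iff (m : Int) : pvIsPPb m ↔ pvIsPP m := by
  unfold pvIsPPb pvIsPP
  constructor
  · rintro ⟨b, hb, k, hk, hk2, he⟩
    rw [PySem.List.mem_pyRange_one] at hb
    exact ⟨b, k, hb.1, hk2, he⟩
  · rintro ⟨b, k, hb, hk, he⟩
    refine ⟨b, ?_, k, ?_, hk, he⟩
    · rw [PySem.List.mem_pyRange_one]
      have h1 : b ^ 1 ≤ b ^ k := pow_le_pow_right₀ (by omega) (by omega)
      simp only [pow_one] at h1
      omega
    · rw [List.mem_range]
      have h1 : (2:ℤ) ^ k ≤ b ^ k := pow_le_pow_left₀ (by omega) (by omega) k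
      have h2 : (k:ℤ) < 2 ^ k := by exact_mod_cast Nat.lt_two_pow_self
      omega

-- ---- number theory core ----
def pvIsPPn (m : ℕ) : Prop := ∃ a k : ℕ, 2 ≤ a ∧ 2 ≤ k ∧ a ^ k = m

-- if every exponent of b's factorization is divisible by d then b is a d-th power
theorem pv_exists_root (b d : ℕ) (hb : 2 ≤ b) (hd : 1 ≤ d)
    (h : ∀ p, d ∣ b.factorization p) : ∃ a, 2 ≤ a ∧ a ^ d = b := by
  refine ⟨b.factorization.prod (fun p e => p ^ (e / d)), ?_, ?_⟩
  case refine_2 =>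
    have hb0 : b ≠ 0 := by omega
    calc (b.factorization.prod fun p e => p ^ (e / d)) ^ d
        = b.factorization.prod (fun p e => (p ^ (e / d)) ^ d) := by
          rw [Finsupp.prod, Finsupp.prod, ← Finset.prod_pow]
      _ = b.factorization.prod (fun p e => p ^ e) := by
          apply Finsupp.prod_congr
          intro p hp
          rw [← pow_mul, Nat.div_mul_cancel (h p)]
      _ = b := Nat.prod_factorization_pow_eq_self hb0
  case refine_1 =>
    by_contra hlt
    have h1 : (b.factorization.prod fun p e => p ^ (e / d)) ≤ 1 := by omega
    have h2 : (b.factorization.prod fun p e => p ^ (e / d)) ^ d ≤ 1 ^ d :=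
      Nat.pow_le_pow_left h1 d
    have h3 : (b.factorization.prod fun p e => p ^ (e / d)) ^ d = b := by
      have hb0 : b ≠ 0 := by omega
      calc (b.factorization.prod fun p e => p ^ (e / d)) ^ d
          = b.factorization.prod (fun p e => (p ^ (e / d)) ^ d) := by
            rw [Finsupp.prod, Finsupp.prod, ← Finset.prod_pow]
        _ = b.factorization.prod (fun p e => p ^ e) := by
            apply Finsupp.prod_congr
            intro p hp
            rw [← pow_mul, Nat.div_mul_cancel (h p)]
        _ = b := Nat.prod_factorization_pow_eq_self hb0
    simp only [one_pow] at h2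
    omega

-- uniqueness of the non-power base
theorem pv_base_unique (b c k j : ℕ) (hb : 2 ≤ b) (hc : 2 ≤ c) (hk : 2 ≤ k) (hj : 2 ≤ j)
    (hnb : ¬ pvIsPPn b) (hnc : ¬ pvIsPPn c) (h : b ^ k = c ^ j) : b = c := by
  have hfac : ∀ p : ℕ, k * b.factorization p = j * c.factorization p := by
    intro p
    have h1 : (b ^ k).factorization = k • b.factorization := Nat.factorization_pow b k
    have h2 : (c ^ j).factorization = j • c.factorization := Nat.factorization_pow c j
    have h3 : (k • b.factorization) p = (j • c.factorization) p := by rw [← h1, ← h2, h]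
    simpa using h3
  set g := Nat.gcd k j with hg
  have hgpos : 0 < g := Nat.gcd_pos_of_pos_left j (by omega)
  have hkg : g * (k / g) = k := Nat.mul_div_cancel' (Nat.gcd_dvd_left k j)
  have hjg : g * (j / g) = j := Nat.mul_div_cancel' (Nat.gcd_dvd_right k j)
  have hco : Nat.Coprime (k / g) (j / g) := Nat.coprime_div_gcd_div_gcd hgpos
  have hfac' : ∀ p, (k / g) * b.factorization p = (j / g) * c.factorization p := by
    intro p
    have := hfac p
    rw [← hkg, ← hjg] at this
    have hmul : g * ((k / g) * b.factorization p) = g * ((j / g) * c.factorization p) := by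
      rw [← mul_assoc, ← mul_assoc]; exact this
    exact Nat.eq_of_mul_eq_mul_left hgpos hmul
  have hj1 : j / g = 1 := by
    by_contra hne
    have hdvd : ∀ p, (j / g) ∣ b.factorization p := by
      intro p
      have hd : (j / g) ∣ (k / g) * b.factorization p := ⟨c.factorization p, by rw [hfac' p]⟩
      exact (Nat.Coprime.dvd_of_dvd_mul_left hco.symm hd)
    have hjg1 : 1 ≤ j / g := by
      rcases Nat.eq_zero_or_pos (j / g) with h0 | h1
      · rw [h0] at hjg; omega
      · omega
    obtain ⟨a, ha2, hab⟩ := pv_exists_root b (j / g) hb (by omega) hdvd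
    have h2jg : 2 ≤ j / g := by
      rcases Nat.eq_or_lt_of_le hjg1 with h1 | h1
      · exact absurd h1.symm hne
      · omega
    exact hnb ⟨a, j / g, ha2, h2jg, hab⟩
  have hk1 : k / g = 1 := by
    by_contra hne
    have hdvd : ∀ p, (k / g) ∣ c.factorization p := by
      intro p
      have hd : (k / g) ∣ (j / g) * c.factorization p := ⟨b.factorization p, by rw [← hfac' p]⟩
      exact (Nat.Coprime.dvd_of_dvd_mul_left hco hd)
    have hkg1 : 1 ≤ k / g := by
      rcases Nat.eq_zero_or_pos (k / g) with h0 | h1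
      · rw [h0] at hkg; omega
      · omega
    obtain ⟨a, ha2, hab⟩ := pv_exists_root c (k / g) hc (by omega) hdvd
    have h2kg : 2 ≤ k / g := by
      rcases Nat.eq_or_lt_of_le hkg1 with h1 | h1
      · exact absurd h1.symm hne
      · omega
    exact hnc ⟨a, k / g, ha2, h2kg, hab⟩
  have hkj : k = j := by rw [hk1, mul_one] at hkg; rw [hj1, mul_one] at hjg; omega
  subst hkj
  exact Nat.pow_left_injective (by omega) h

-- existence of a non-power base representation
theorem pv_canonical (b : ℕ) (hb : 2 ≤ b) : ∀ k, 2 ≤ k →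
    ∃ c e, 2 ≤ c ∧ 2 ≤ e ∧ ¬ pvIsPPn c ∧ c ^ e = b ^ k := by
  induction b using Nat.strong_induction_on with
  | _ b ih =>
    intro k hk
    by_cases hpp : pvIsPPn b
    · obtain ⟨a, t, ha, ht, hat⟩ := hpp
      have hab : a < b := by
        calc a = a ^ 1 := (pow_one a).symm
          _ < a ^ t := Nat.pow_lt_pow_right (by omega) (by omega)
          _ = b := hat
      obtain ⟨c, e, hc, he, hnc, hce⟩ := ih a hab ha (t * k) (by nlinarith)
      refine ⟨c, e, hc, he, hnc, ?_⟩
      rw [hce, ← hat, ← pow_mul]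
    · exact ⟨b, k, hb, hk, hpp, rfl⟩

-- transfers ℤ ↔ ℕ
theorem pvIsPP_iff_nat (m : Int) (hm : 2 ≤ m) : pvIsPP m ↔ pvIsPPn m.toNat := by
  constructor
  · rintro ⟨b, k, hb, hk, he⟩
    refine ⟨b.toNat, k, by omega, hk, ?_⟩
    have hcast : ((b.toNat ^ k : ℕ) : ℤ) = m := by
      push_cast [Int.toNat_of_nonneg (by omega : (0:ℤ) ≤ b)]
      exact he
    omega
  · rintro ⟨a, k, ha, hk, he⟩
    refine ⟨(a : ℤ), k, by exact_mod_cast ha, hk, ?_⟩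
    calc ((a : ℤ)) ^ k = ((a ^ k : ℕ) : ℤ) := by push_cast; ring
      _ = ((m.toNat : ℕ) : ℤ) := by rw [he]
      _ = m := Int.toNat_of_nonneg (by omega)

theorem pv_base_unique_int (b c : Int) (k j : ℕ) (hb : 2 ≤ b) (hc : 2 ≤ c) (hk : 2 ≤ k) (hj : 2 ≤ j)
    (hnb : ¬ pvIsPP b) (hnc : ¬ pvIsPP c) (h : b ^ k = c ^ j) : b = c := by
  have hnat : b.toNat ^ k = c.toNat ^ j := by
    have hcast : ((b.toNat ^ k : ℕ) : ℤ) = ((c.toNat ^ j : ℕ) : ℤ) := by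
      push_cast [Int.toNat_of_nonneg (by omega : (0:ℤ) ≤ b),
        Int.toNat_of_nonneg (by omega : (0:ℤ) ≤ c)]
      exact h
    exact_mod_cast hcast
  have hbc : b.toNat = c.toNat :=
    pv_base_unique b.toNat c.toNat k j (by omega) (by omega) hk hj
      (fun hp => hnb ((pvIsPP_iff_nat b hb).mpr hp))
      (fun hp => hnc ((pvIsPP_iff_nat c hc).mpr hp)) hnat
  omega

theorem pv_canonical_int (b : Int) (k : ℕ) (hb : 2 ≤ b) (hk : 2 ≤ k) :
    ∃ c : Int, ∃ e : ℕ, 2 ≤ c ∧ 2 ≤ e ∧ ¬ pvIsPP c ∧ c ^ e = b ^ k := by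
  obtain ⟨c, e, hc, he, hnc, hce⟩ := pv_canonical b.toNat (by omega) k hk
  refine ⟨(c : ℤ), e, by exact_mod_cast hc, he, ?_, ?_⟩
  · intro hpp
    have h2c : (2:ℤ) ≤ (c:ℤ) := by exact_mod_cast hc
    have := (pvIsPP_iff_nat (c : ℤ) h2c).mp hpp
    simp only [Int.toNat_natCast] at this
    exact hnc this
  · have hcast : ((c ^ e : ℕ) : ℤ) = ((b.toNat ^ k : ℕ) : ℤ) := by rw [hce]
    push_cast [Int.toNat_of_nonneg (by omega : (0:ℤ) ≤ b)] at hcast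
    exact_mod_cast hcast

-- ---- A-side characterisation ----
theorem pvWhileA_mem (n i j : Int) (v : PySem.Set Int) (hi : 2 ≤ i) (hj : 0 < j) (x : Int) :
    x ∈ pvWhileA n i j v ↔ x ∈ v ∨ ∃ t : ℕ, 1 ≤ t ∧ x = j * i ^ t ∧ x ≤ n := by
  induction j, v using pvWhileA.induct n i with
  | case1 j v h ih =>
    rw [pvWhileA, dif_pos h]
    rw [ih (by positivity), PySem.Set.mem_add]
    constructor
    · rintro (( hv | rfl) | ⟨t, ht, rfl, hle⟩)
      · exact Or.inl hv
      · exact Or.inr ⟨1, le_refl 1, by ring, h.2.2⟩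
      · exact Or.inr ⟨t + 1, by omega, by ring, hle⟩
    · rintro (hv | ⟨t, ht, rfl, hle⟩)
      · exact Or.inl (Or.inl hv)
      · cases t with
        | zero => omega
        | succ s =>
          cases s with
          | zero => exact Or.inl (Or.inr (by ring))
          | succ u =>
            exact Or.inr ⟨u + 1, by omega, by ring, hle⟩
  | case2 j v h =>
    rw [pvWhileA, dif_neg h]
    have hn : ¬ j * i ≤ n := by tauto
    constructor
    · exact Or.inl
    · rintro (hv | ⟨t, ht, rfl, hle⟩)
      · exact hv
      · exfalso
        have h1 : i ^ 1 ≤ i ^ t := pow_le_pow_right₀ (by omega) ht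
        simp only [pow_one] at h1
        have h2 : j * i ≤ j * i ^ t := mul_le_mul_of_nonneg_left h1 (by omega)
        omega

theorem pvWhileA_nodup (n i j : Int) (v : PySem.Set Int) (hv : v.Nodup) :
    (pvWhileA n i j v).Nodup := by
  induction j, v using pvWhileA.induct n i with
  | case1 j v h ih =>
    rw [pvWhileA, dif_pos h]
    exact ih (PySem.Set.nodup_add _ _ hv)
  | case2 j v h =>
    rw [pvWhileA, dif_neg h]
    exact hv

theorem pvFoldA_mem (n k : Int) (v : PySem.Set Int) (hk : 2 ≤ k) (x : Int) :
    x ∈ (PySem.List.pyRange k (n + 1) 1).foldl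
      (fun v i => if i * i ≤ n then pvWhileA n i (i * i) (v.add (i * i)) else v) v
    ↔ x ∈ v ∨ ∃ b : Int, ∃ e : ℕ, k ≤ b ∧ 2 ≤ e ∧ b ^ e = x ∧ x ≤ n := by
  by_cases hkn : k < n + 1
  · rw [PySem.List.pyRange_one_cons hkn]
    simp only [List.foldl_cons]
    rw [pvFoldA_mem n (k + 1) _ (by omega) x]
    have hstep : x ∈ (if k * k ≤ n then pvWhileA n k (k * k) (v.add (k * k)) else v)
        ↔ x ∈ v ∨ (k * k ≤ n ∧ (x = k * k ∨ ∃ t : ℕ, 1 ≤ t ∧ x = k * k * k ^ t ∧ x ≤ n)) := by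
      by_cases hkk : k * k ≤ n
      · rw [if_pos hkk, pvWhileA_mem n k (k * k) _ hk (by positivity), PySem.Set.mem_add]
        tauto
      · rw [if_neg hkk]; tauto
    rw [hstep]
    constructor
    · rintro ((hv | ⟨hkk, hx⟩) | ⟨b, e, hb, he, rfl, hle⟩)
      · exact Or.inl hv
      · rcases hx with rfl | ⟨t, ht, rfl, hle⟩
        · exact Or.inr ⟨k, 2, le_refl k, le_refl 2, by ring, hkk⟩
        · exact Or.inr ⟨k, t + 2, le_refl k, by omega, by ring, hle⟩
      · exact Or.inr ⟨b, e, by omega, he, rfl, hle⟩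
    · rintro (hv | ⟨b, e, hb, he, rfl, hle⟩)
      · exact Or.inl (Or.inl hv)
      · rcases eq_or_lt_of_le hb with rfl | hlt
        · have hkk : k * k ≤ n := by
            have h1 : k ^ 2 ≤ k ^ e := pow_le_pow_right₀ (by omega) he
            calc k * k = k ^ 2 := by ring
              _ ≤ k ^ e := h1
              _ ≤ n := hle
          refine Or.inl (Or.inr ⟨hkk, ?_⟩)
          rcases Nat.lt_or_ge e 3 with he3 | he3
          · have he2 : e = 2 := by omega
            subst he2
            exact Or.inl (by ring)
          · refine Or.inr ⟨e - 2, by omega, ?_, hle⟩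
            have hrw : k * k * k ^ (e - 2) = k ^ (e - 2 + 2) := by ring
            rw [hrw]
            congr 1
            omega
        · exact Or.inr ⟨b, e, by omega, he, rfl, hle⟩
  · rw [PySem.List.pyRange_one_eq_nil (by omega)]
    simp only [List.foldl_nil]
    constructor
    · exact Or.inl
    · rintro (hv | ⟨b, e, hb, he, rfl, hle⟩)
      · exact hv
      · exfalso
        have h1 : b ^ 1 ≤ b ^ e := pow_le_pow_right₀ (by omega) (by omega)
        simp only [pow_one] at h1
        omega
termination_by (n + 1 - k).toNat

theorem pvFoldA_nodup (n : Int) (l : List Int) (v : PySem.Set Int) (hv : v.Nodup) :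
    (l.foldl (fun v i => if i * i ≤ n then pvWhileA n i (i * i) (v.add (i * i)) else v) v).Nodup := by
  induction l generalizing v with
  | nil => exact hv
  | cons i l ih =>
    simp only [List.foldl_cons]
    apply ih
    by_cases hii : i * i ≤ n
    · rw [if_pos hii]
      exact pvWhileA_nodup n i (i * i) _ (PySem.Set.nodup_add _ _ hv)
    · rw [if_neg hii]
      exact hv

theorem powerNumbers_eq_card (n : Int) : powerNumbers n = 1 + ((pvPP n).card : Int) := by
  unfold powerNumbers
  set S := (PySem.List.pyRange 2 (n + 1) 1).foldl
    (fun v i => if i * i ≤ n then pvWhileA n i (i * i) (v.add (i * i)) else v)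
    ((PySem.Set.empty).add 1) with hS
  have hnodup : S.Nodup := pvFoldA_nodup n _ _ (by decide)
  have hmem : ∀ x, x ∈ S ↔ x = 1 ∨ x ∈ pvPP n := by
    intro x
    rw [hS, pvFoldA_mem n 2 _ (le_refl 2) x]
    have h0 : x ∈ (PySem.Set.empty : PySem.Set Int).add 1 ↔ x = 1 := by
      simp [PySem.Set.add, PySem.Set.empty, PySem.Set.contains]
    rw [h0]
    unfold pvPP
    simp only [Finset.mem_filter, Finset.mem_Icc]
    constructor
    · rintro (rfl | ⟨b, e, hb, he, rfl, hle⟩)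
      · exact Or.inl rfl
      · refine Or.inr ⟨⟨?_, hle⟩, ?_⟩
        · have h1 : b ^ 1 ≤ b ^ e := pow_le_pow_right₀ (by omega) (by omega)
          simp only [pow_one] at h1
          omega
        · exact (pvIsPPb_iff _).mpr ⟨b, e, hb, he, rfl⟩
    · rintro (rfl | ⟨⟨hx2, hxn⟩, hpp⟩)
      · exact Or.inl rfl
      · obtain ⟨b, e, hb, he, hbe⟩ := (pvIsPPb_iff _).mp hpp
        exact Or.inr ⟨b, e, hb, he, hbe, hxn⟩
  have hfin : S.toFinset = insert 1 (pvPP n) := by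
    ext x
    rw [List.mem_toFinset, hmem x, Finset.mem_insert]
  have hlen : S.length = S.toFinset.card := (List.toFinset_card_of_nodup hnodup).symm
  have h1pp : (1:ℤ) ∉ pvPP n := by
    unfold pvPP
    simp only [Finset.mem_filter, Finset.mem_Icc]
    omega
  have : PySem.Set.len S = (S.length : Int) := rfl
  rw [this, hlen, hfin, Finset.card_insert_of_notMem h1pp]
  push_cast
  ring

-- ---- B-side characterisation ----
theorem pvIsPowInner_iff (m a p : Int) (ha : 2 ≤ a) (hp : 0 < p) (hm : 0 < m) :
    pvIsPowInner m a p = true ↔ ∃ t : ℕ, p * a ^ t = m := by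
  induction p using pvIsPowInner.induct m a with
  | case1 p h ih =>
    rw [pvIsPowInner, dif_pos h]
    rw [ih (by positivity)]
    constructor
    · rintro ⟨t, ht⟩
      exact ⟨t + 1, by rw [← ht]; ring⟩
    · rintro ⟨t, ht⟩
      cases t with
      | zero => simp at ht; omega
      | succ s => exact ⟨s, by rw [← ht]; ring⟩
  | case2 p h =>
    rw [pvIsPowInner, dif_neg h]
    have hnlt : ¬ p < m := by tauto
    rw [beq_iff_eq]
    constructor
    · rintro rfl; exact ⟨0, by ring⟩
    · rintro ⟨t, ht⟩
      cases t with
      | zero => simpa using ht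
      | succ s =>
        exfalso
        have h1 : a ^ 1 ≤ a ^ (s + 1) := pow_le_pow_right₀ (by omega) (by omega)
        simp at h1
        nlinarith

theorem pvIsPow_iff (m a : Int) (ha : 2 ≤ a) (hm : 0 < m) :
    pvIsPow m a = true ↔ ∃ b : Int, ∃ k : ℕ, a ≤ b ∧ 2 ≤ k ∧ b ^ k = m := by
  induction a using pvIsPow.induct m with
  | case1 a h hinner =>
    rw [pvIsPow, dif_pos h, if_pos hinner]
    simp only [true_iff]
    have := (pvIsPowInner_iff m a (a * a) h.1 (by positivity) hm).mp hinner
    obtain ⟨t, ht⟩ := this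
    refine ⟨a, t + 2, le_refl a, by omega, ?_⟩
    rw [← ht]; ring
  | case2 a h hinner ih =>
    rw [pvIsPow, dif_pos h, if_neg (by simpa using hinner)]
    rw [ih (by omega)]
    constructor
    · rintro ⟨b, k, hab, hk, he⟩
      exact ⟨b, k, by omega, hk, he⟩
    · rintro ⟨b, k, hab, hk, he⟩
      rcases eq_or_lt_of_le hab with rfl | hlt
      · exfalso
        have hfalse : pvIsPowInner m a (a * a) = true := by
          rw [pvIsPowInner_iff m a (a * a) h.1 (by positivity) hm]
          refine ⟨k - 2, ?_⟩
          rw [← he]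
          have hrw : a * a * a ^ (k - 2) = a ^ (k - 2 + 2) := by ring
          rw [hrw]
          congr 1
          omega
        exact hinner hfalse
      · exact ⟨b, k, by omega, hk, he⟩
  | case3 a h =>
    rw [pvIsPow, dif_neg h]
    have hna : ¬ a * a ≤ m := by tauto
    simp only [Bool.false_eq_true, false_iff]
    rintro ⟨b, k, hab, hk, he⟩
    have h1 : a * a ≤ b * b := by nlinarith
    have h2 : b ^ 2 ≤ b ^ k := pow_le_pow_right₀ (by omega) hk
    have h3 : b * b = b ^ 2 := by ring
    nlinarith [he ▸ h2]

theorem pvIsPow_two_iff (m : Int) (hm : 0 < m) : pvIsPow m 2 = true ↔ pvIsPP m := by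
  rw [pvIsPow_iff m 2 (le_refl 2) hm]
  rfl

-- number of exponents counted for base b (as s ↦ b^(s+2))
def pvE (n b : Int) : ℕ := ((Finset.range (n.toNat + 1)).filter (fun s => b * b * b ^ s ≤ n)).card

theorem pvCountB_eq (n b p t : Int) (hb : 2 ≤ b) (hp : 0 < p) :
    pvCountB n b p t = t + (((Finset.range (n.toNat + 1)).filter (fun s => p * b ^ s ≤ n)).card : Int) := by
  induction p, t using pvCountB.induct n b with
  | case1 p t h ih =>
    rw [pvCountB, dif_pos h]
    rw [ih (by positivity)]
    have hset : (Finset.range (n.toNat + 1)).filter (fun s => p * b ^ s ≤ n)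
        = insert 0 (((Finset.range (n.toNat + 1)).filter (fun s => p * b * b ^ s ≤ n)).image Nat.succ) := by
      ext s
      simp only [Finset.mem_filter, Finset.mem_range, Finset.mem_insert, Finset.mem_image]
      constructor
      · rintro ⟨hsr, hsle⟩
        cases s with
        | zero => exact Or.inl rfl
        | succ u =>
          refine Or.inr ⟨u, ⟨by omega, ?_⟩, rfl⟩
          calc p * b * b ^ u = p * b ^ (u + 1) := by ring
            _ ≤ n := hsle
      · rintro (rfl | ⟨u, ⟨hur, hule⟩, rfl⟩)
        · refine ⟨by omega, by simpa using h.2.2⟩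
        · have hle : p * b ^ (u + 1) ≤ n := by
            calc p * b ^ (u + 1) = p * b * b ^ u := by ring
              _ ≤ n := hule
        -- u+1 < n.toNat + 1 because u+1 < 2^(u+1) ≤ p * b^(u+1) ≤ n
          have h1 : (2:ℤ) ^ (u + 1) ≤ b ^ (u + 1) := pow_le_pow_left₀ (by omega) (by omega) _
          have h2 : (1:ℤ) * b ^ (u + 1) ≤ p * b ^ (u + 1) :=
            mul_le_mul_of_nonneg_right (by omega) (by positivity)
          have h3 : ((u:ℤ) + 1) < 2 ^ (u + 1) := by exact_mod_cast (Nat.lt_two_pow_self (n := u + 1))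
          constructor
          · omega
          · exact hle
    rw [hset, Finset.card_insert_of_notMem (by simp), Finset.card_image_of_injective _ Nat.succ_injective]
    push_cast
    ring
  | case2 p t h =>
    rw [pvCountB, dif_neg h]
    have hnp : ¬ p ≤ n := by tauto
    have hempty : (Finset.range (n.toNat + 1)).filter (fun s => p * b ^ s ≤ n) = ∅ := by
      rw [Finset.filter_eq_empty_iff]
      intro s _
      have h1 : (1:ℤ) ≤ b ^ s := one_le_pow₀ (by omega)
      simp only [not_le]
      nlinarith
    rw [hempty]
    simp

noncomputable def pvBases (n b : Int) : Finset ℤ := (Finset.Icc b n).filter (fun c => c * c ≤ n ∧ ¬ pvIsPPb c)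

theorem pvOuterB_eq (n b t : Int) (hb : 2 ≤ b) :
    pvOuterB n b t = t + ∑ c ∈ pvBases n b, (pvE n c : Int) := by
  induction b, t using pvOuterB.induct n with
  | case1 b t h ih =>
    rw [pvOuterB, dif_pos h]
    have ih' := ih (by omega)
    simp only [dite_eq_ite] at ih'
    rw [ih']
    have hbn : b ≤ n := by nlinarith [h.1, h.2]
    have hicc : pvBases n b = if pvIsPPb b then pvBases n (b + 1)
        else insert b (pvBases n (b + 1)) := by
      unfold pvBases
      rw [← Finset.insert_Icc_add_one_left_eq_Icc hbn, Finset.filter_insert]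
      by_cases hpp : pvIsPPb b
      · rw [if_neg (fun hx => hx.2 hpp), if_pos hpp]
      · rw [if_pos ⟨h.2, hpp⟩, if_neg hpp]
    have hnotmem : b ∉ pvBases n (b + 1) := by
      unfold pvBases
      simp only [Finset.mem_filter, Finset.mem_Icc]
      omega
    have hppiff : pvIsPow b 2 = true ↔ pvIsPPb b := by
      rw [pvIsPow_two_iff b (by omega), pvIsPPb_iff]
    by_cases hpp : pvIsPPb b
    · rw [if_pos (hppiff.mpr hpp), hicc, if_pos hpp]
    · rw [if_neg (fun hc => hpp (hppiff.mp hc)), hicc, if_neg hpp,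
        Finset.sum_insert hnotmem,
        pvCountB_eq n b (b * b) t h.1 (by positivity)]
      unfold pvE
      ring
  | case2 b t h =>
    rw [pvOuterB, dif_neg h]
    have hempty : pvBases n b = ∅ := by
      unfold pvBases
      rw [Finset.filter_eq_empty_iff]
      rintro c hc ⟨hcc, -⟩
      rw [Finset.mem_Icc] at hc
      have : b * b ≤ c * c := by nlinarith [hc.1]
      exact absurd ⟨hb, by nlinarith⟩ h
    rw [hempty]
    simp

-- ---- the combinatorial identity ----
theorem pv_sum_eq_card (n : Int) : ∑ c ∈ pvBases n 2, (pvE n c : Int) = ((pvPP n).card : Int) := by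
  have hmemB : ∀ c : ℤ, c ∈ pvBases n 2 ↔ 2 ≤ c ∧ c ≤ n ∧ c * c ≤ n ∧ ¬ pvIsPP c := by
    intro c
    unfold pvBases
    simp only [Finset.mem_filter, Finset.mem_Icc, pvIsPPb_iff]
    tauto
  have hbiun : pvPP n = (pvBases n 2).biUnion
      (fun c => (((Finset.range (n.toNat + 1)).filter (fun s => c * c * c ^ s ≤ n)).image
        (fun s => c * c * c ^ s))) := by
    ext m
    simp only [Finset.mem_biUnion, Finset.mem_image, Finset.mem_filter, Finset.mem_range]
    unfold pvPP
    simp only [Finset.mem_filter, Finset.mem_Icc, pvIsPPb_iff]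
    constructor
    · rintro ⟨⟨h2m, hmn⟩, hpp⟩
      obtain ⟨b, k, hb, hk, hbk⟩ := hpp
      obtain ⟨c, e, hc, he, hnc, hce⟩ := pv_canonical_int b k hb hk
      have hcem : c ^ e = m := by rw [hce, hbk]
      have hcm : c ≤ m := by
        calc c = c ^ 1 := (pow_one c).symm
          _ ≤ c ^ e := pow_le_pow_right₀ (by omega) (by omega)
          _ = m := hcem
      have hccm : c * c ≤ m := by
        calc c * c = c ^ 2 := by ring
          _ ≤ c ^ e := pow_le_pow_right₀ (by omega) he
          _ = m := hcem
      have hebound : ((e : ℤ)) < n := by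
        have h1 : ((e : ℤ)) < 2 ^ e := by exact_mod_cast Nat.lt_two_pow_self
        have h2 : (2:ℤ) ^ e ≤ c ^ e := pow_le_pow_left₀ (by omega) (by omega) e
        omega
      refine ⟨c, (hmemB c).mpr ⟨hc, by omega, by omega, hnc⟩, e - 2, ⟨by omega, ?_⟩, ?_⟩
      · have hrw : c * c * c ^ (e - 2) = c ^ (e - 2 + 2) := by ring
        rw [hrw, show e - 2 + 2 = e from by omega, hcem]
        exact hmn
      · have hrw : c * c * c ^ (e - 2) = c ^ (e - 2 + 2) := by ring
        rw [hrw, show e - 2 + 2 = e from by omega]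
        exact hcem
    · rintro ⟨c, hcB, s, ⟨hsr, hsle⟩, rfl⟩
      obtain ⟨hc2, -, -, -⟩ := (hmemB c).mp hcB
      have h1 : (1:ℤ) ≤ c ^ s := one_le_pow₀ (by omega)
      refine ⟨⟨by nlinarith, hsle⟩, ⟨c, s + 2, hc2, by omega, by ring⟩⟩
  have hdisj : ∀ c ∈ pvBases n 2, ∀ c' ∈ pvBases n 2, c ≠ c' →
      Disjoint (((Finset.range (n.toNat + 1)).filter (fun s => c * c * c ^ s ≤ n)).image
          (fun s => c * c * c ^ s))
        (((Finset.range (n.toNat + 1)).filter (fun s => c' * c' * c' ^ s ≤ n)).image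
          (fun s => c' * c' * c' ^ s)) := by
    intro c hc c' hc' hne
    rw [Finset.disjoint_left]
    rintro y hy hy'
    obtain ⟨hc2, -, -, hcnp⟩ := (hmemB c).mp hc
    obtain ⟨hc'2, -, -, hc'np⟩ := (hmemB c').mp hc'
    simp only [Finset.mem_image, Finset.mem_filter, Finset.mem_range] at hy hy'
    obtain ⟨s, -, hs⟩ := hy
    obtain ⟨s', -, hs'⟩ := hy'
    have heq : c ^ (s + 2) = c' ^ (s' + 2) := by
      have h1 : c * c * c ^ s = c ^ (s + 2) := by ring
      have h2 : c' * c' * c' ^ s' = c' ^ (s' + 2) := by ring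
      rw [← h1, ← h2, hs, hs']
    exact hne (pv_base_unique_int c c' (s + 2) (s' + 2) hc2 hc'2 (by omega) (by omega) hcnp hc'np heq)
  have hcard : (pvPP n).card = ∑ c ∈ pvBases n 2, pvE n c := by
    rw [hbiun, Finset.card_biUnion hdisj]
    refine Finset.sum_congr rfl ?_
    intro c hcB
    obtain ⟨hc2, -, -, -⟩ := (hmemB c).mp hcB
    unfold pvE
    apply Finset.card_image_of_injective
    intro s t hst
    simp only at hst
    have heq : c ^ (s + 2) = c ^ (t + 2) := by
      have h1 : c * c * c ^ s = c ^ (s + 2) := by ring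
      have h2 : c * c * c ^ t = c ^ (t + 2) := by ring
      rw [← h1, ← h2, hst]
    have := (pow_right_strictMono₀ (by omega : (1:ℤ) < c)).injective heq
    omega
  rw [hcard]
  push_cast
  rfl

theorem powerNumbers_alt_eq_card (n : Int) : powerNumbers_alt n = 1 + ((pvPP n).card : Int) := by
  unfold powerNumbers_alt
  rw [pvOuterB_eq n 2 1 (le_refl 2), pv_sum_eq_card]

-- ===== VERDICT (by name: the statement is the Claim_ definition above) =====
theorem powerNumbers_spec : Claim_equal_powerNumbers := by
  intro n _
  unfold Spec_powerNumbers
  rw [powerNumbers_eq_card, powerNumbers_alt_eq_card]
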